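-- pv_equiv track=rewrite | github.com/liuhahi/sg_noi_archive | 2016/unluckyfloors/solution_5_clean.py | dp
-- ===== SOURCE A (Python) =====
-- def dp(p, d):
--     if p == 0 or d == 4:
--         return 0
--     elif p == 1:
--         return 1
--     elif p > 1:
--         if d == 0:
--             return dp(p-1, 0) + dp(p-1, 1) + dp(p-1, 2) + dp(p-1,3) + dp(p-1,5) + dp(p-1,6) + dp(p-1,7) + dp(p-1,8) + dp(p-1,9)
--         elif d == 1:
--             return 7 * (dp(p - 1, 2)) + dp(p - 1, 1)
--         else:
--             return 8 * (dp(p - 1, 2)) + dp(p - 1, 1)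
-- ===== SOURCE B (Python) =====
-- def dp(p, d):
--     # Bottom-up iteration over the three distinct states (d==0, d==1, other),
--     # O(p) instead of A's exponential branching recursion.
--     if p <= 0 or d == 4:
--         return 0
--     f = g = z = 1  # dp(1,1), dp(1,2), dp(1,0)
--     for _ in range(p - 1):
--         f, g, z = 7 * g + f, 8 * g + f, z + f + 7 * g
--     if d == 0:
--         return z
--     if d == 1:
--         return f
--     return g
-- ===== Notes on version B (the rewrite author's own statement) =====
-- stated objective: faster
-- what changed: Replaced the exponential branching recursion by a single bottom-up loop carrying the three distinct state values (d==0, d==1, other non-4 digit).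
-- outside the precondition, e.g. on dp(-1, 0): A returns None, B returns 0
import Mathlib
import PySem

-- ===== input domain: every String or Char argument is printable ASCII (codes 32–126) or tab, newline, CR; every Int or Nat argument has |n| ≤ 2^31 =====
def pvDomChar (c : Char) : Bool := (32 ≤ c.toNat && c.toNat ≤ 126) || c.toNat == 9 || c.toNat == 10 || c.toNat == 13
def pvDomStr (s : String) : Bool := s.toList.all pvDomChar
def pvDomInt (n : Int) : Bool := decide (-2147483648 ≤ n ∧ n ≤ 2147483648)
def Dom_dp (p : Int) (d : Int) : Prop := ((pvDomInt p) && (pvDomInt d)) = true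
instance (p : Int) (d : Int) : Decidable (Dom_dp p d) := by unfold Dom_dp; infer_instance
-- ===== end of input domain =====

-- B replaces A's exponential branching recursion by one bottom-up O(p) loop over three state values (asymptotically faster).

-- ===== PORT A =====
-- Literal transliteration of A's recursion; for p < 0 Python falls off the
-- if/elif chain and returns None (not an int) — excluded by Pre_dp, 0 here.
def dp (p : Int) (d : Int) : Int :=
  if p = 0 ∨ d = 4 then 0
  else if p = 1 then 1
  else if p > 1 then
    if d = 0 then
      dp (p-1) 0 + dp (p-1) 1 + dp (p-1) 2 + dp (p-1) 3 + dp (p-1) 5 + dp (p-1) 6 + dp (p-1) 7 + dp (p-1) 8 + dp (p-1) 9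
    else if d = 1 then
      7 * dp (p-1) 2 + dp (p-1) 1
    else
      8 * dp (p-1) 2 + dp (p-1) 1
  else 0
termination_by p.toNat
decreasing_by all_goals omega

-- ===== PORT B =====
def dp_alt (p : Int) (d : Int) : Int :=
  if p ≤ 0 ∨ d = 4 then 0
  else
    let s := (List.range (p - 1).toNat).foldl
      (fun (s : Int × Int × Int) _ => (7 * s.2.1 + s.1, 8 * s.2.1 + s.1, s.2.2 + s.1 + 7 * s.2.1))
      (1, 1, 1)
    if d = 0 then s.2.2
    else if d = 1 then s.1
    else s.2.1

-- ===== PRECONDITION & SPEC =====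
-- Pre_ excludes negative p, on which A falls off the if/elif chain and returns
-- None (not an int), and p ≥ 1000 with d ≠ 4, on which A's depth-p recursion
-- exceeds CPython's default recursion limit and raises RecursionError.
def Pre_dp (p : Int) (d : Int) : Prop := 0 ≤ p ∧ (p < 1000 ∨ d = 4)
instance (p : Int) (d : Int) : Decidable (Pre_dp p d) := by unfold Pre_dp; infer_instance
def pvWitness_dp : Int × Int := (5, 3)
def Spec_dp (p : Int) (d : Int) (out : Int) : Prop := out = dp_alt p d
instance (p : Int) (d : Int) (out : Int) : Decidable (Spec_dp p d out) := by unfold Spec_dp; infer_instance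

-- ===== CLAIM (what is proved, stated in full; the proofs are below) =====
def Claim_equal_dp : Prop := ∀ (p : Int) (d : Int), Dom_dp p d → Pre_dp p d → Spec_dp p d (dp p d)

-- ===== LEMMAS AND PROOFS =====

-- the loop body of B, and its n-fold iterate
def pvStep (s : Int × Int × Int) : Int × Int × Int :=
  (7 * s.2.1 + s.1, 8 * s.2.1 + s.1, s.2.2 + s.1 + 7 * s.2.1)

def pvIter : Nat → Int × Int × Int
  | 0 => (1, 1, 1)
  | n + 1 => pvStep (pvIter n)

theorem foldl_range_pvStep (n : Nat) :
    (List.range n).foldl (fun s _ => pvStep s) (1, 1, 1) = pvIter n := by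
  induction n with
  | zero => rfl
  | succ n ih => rw [List.range_succ, List.foldl_append, ih]; rfl

-- characterisation of A on positive floors: its three states are B's loop values
theorem dp_states (n : Nat) :
    dp (n + 1) 0 = (pvIter n).2.2 ∧ dp (n + 1) 1 = (pvIter n).1 ∧
    ∀ d : Int, d ≠ 0 → d ≠ 1 → d ≠ 4 → dp (n + 1) d = (pvIter n).2.1 := by
  induction n with
  | zero =>
    refine ⟨by rw [dp]; norm_num [pvIter], by rw [dp]; norm_num [pvIter],
      fun d h0 h1 h4 => ?_⟩
    rw [dp]; simp [h4, pvIter]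
  | succ n ih =>
    obtain ⟨hz, hf, hg⟩ := ih
    have hcast : ((n + 1 : Nat) : Int) + 1 = (n : Int) + 1 + 1 := by push_cast; ring
    have hp : ((n : Int) + 1 + 1) - 1 = (n : Int) + 1 := by ring
    have hg2 := hg 2 (by norm_num) (by norm_num) (by norm_num)
    refine ⟨?_, ?_, fun d h0 h1 h4 => ?_⟩
    · rw [hcast, dp,
        if_neg (by omega : ¬((n : Int) + 1 + 1 = 0 ∨ (0 : Int) = 4)),
        if_neg (by omega : ¬((n : Int) + 1 + 1 = 1)),
        if_pos (by omega : (n : Int) + 1 + 1 > 1), if_pos rfl, hp,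
        hz, hf, hg2, hg 3 (by norm_num) (by norm_num) (by norm_num),
        hg 5 (by norm_num) (by norm_num) (by norm_num),
        hg 6 (by norm_num) (by norm_num) (by norm_num),
        hg 7 (by norm_num) (by norm_num) (by norm_num),
        hg 8 (by norm_num) (by norm_num) (by norm_num),
        hg 9 (by norm_num) (by norm_num) (by norm_num)]
      show _ = (pvStep (pvIter n)).2.2
      simp only [pvStep]; ring
    · rw [hcast, dp,
        if_neg (by omega : ¬((n : Int) + 1 + 1 = 0 ∨ (1 : Int) = 4)),
        if_neg (by omega : ¬((n : Int) + 1 + 1 = 1)),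
        if_pos (by omega : (n : Int) + 1 + 1 > 1),
        if_neg (by norm_num : ¬((1 : Int) = 0)), if_pos rfl, hp, hf, hg2]
      show _ = (pvStep (pvIter n)).1
      simp only [pvStep]
    · rw [hcast, dp,
        if_neg (show ¬((n : Int) + 1 + 1 = 0 ∨ d = 4) by
          intro h; rcases h with h | h; omega; exact h4 h),
        if_neg (by omega : ¬((n : Int) + 1 + 1 = 1)),
        if_pos (by omega : (n : Int) + 1 + 1 > 1),
        if_neg h0, if_neg h1, hp, hf, hg2]
      show _ = (pvStep (pvIter n)).2.1
      simp only [pvStep]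

-- ===== VERDICT (by name: the statement is the Claim_ definition above) =====
theorem dp_spec : Claim_equal_dp := by
  intro p d _ hpre
  show dp p d = dp_alt p d
  by_cases h4 : d = 4
  · subst h4
    rw [dp, dp_alt]
    by_cases hp0 : p = 0 <;> simp [hp0]
  by_cases hp0 : p = 0
  · subst hp0; rw [dp, dp_alt]; simp
  -- p ≥ 1: write p = n + 1
  have hpre' : (0 : Int) ≤ p := hpre.1
  obtain ⟨n, hn⟩ : ∃ n : Nat, p = (n : Int) + 1 := ⟨(p - 1).toNat, by omega⟩
  subst hn
  obtain ⟨hz, hf, hg⟩ := dp_states n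
  rw [dp_alt,
    if_neg (show ¬((n : Int) + 1 ≤ 0 ∨ d = 4) by
      intro h; rcases h with h | h; omega; exact h4 h)]
  have hnt : ((n : Int) + 1 - 1).toNat = n := by omega
  simp only [hnt]
  rw [show (fun (s : Int × Int × Int) _ => (7 * s.2.1 + s.1, 8 * s.2.1 + s.1, s.2.2 + s.1 + 7 * s.2.1)) = (fun s (_ : Nat) => pvStep s) from rfl, foldl_range_pvStep]
  by_cases h0 : d = 0
  · subst h0; simpa using hz
  by_cases h1 : d = 1
  · subst h1; simp only [if_neg (by norm_num : ¬((1 : Int) = 0))]; exact hf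
  · rw [if_neg h0, if_neg h1]; exact hg d h0 h1 h4
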